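-- pv_equiv track=rewrite | github.com/johnnycoolcool/MA-EMD | MA-EMD code/Hybrid_model.py | Rolldecom
-- ===== SOURCE A (Python) =====
-- def Rolldecom(data, PERIODS):
--     import copy  #使用copy函数，避免append时由于指向地址（而不是真正将值赋予列表）而导致的当对象改变时，列表也跟着改变
--     trainX, trainY = data[:-PERIODS], data[-PERIODS:]
--
--     trainX = list(trainX)
--     trainY = list(trainY)
--     trainX_all = []
--     trainY_all = []
--     trainY0 = copy.deepcopy(trainY)
--
--     trainX_all.append(copy.deepcopy(trainX))
--     trainY_all.append(copy.deepcopy(trainY0))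
--
--     for i in range(PERIODS-1):
--         trainX.append(copy.deepcopy(trainY[i]))
--         trainX_all.append(copy.deepcopy(trainX))
--         trainY0.pop(0)
--         trainY_all.append(copy.deepcopy(trainY0))
-- # trainX_all, trainY_all    为用于滚动分解的X和Y序列
--
--
--     return trainX_all, trainY_all
-- ===== SOURCE B (Python) =====
-- import copy
--
--
-- def Rolldecom(data, PERIODS):
--     # Build each window independently by slicing instead of mutating running lists.
--     trainX = list(data[:-PERIODS])
--     trainY = list(data[-PERIODS:])
--     n = max(1, PERIODS)
--     trainX_all = [copy.deepcopy(trainX + trainY[:k]) for k in range(n)]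
--     trainY_all = [copy.deepcopy(trainY[k:]) for k in range(n)]
--     return trainX_all, trainY_all
-- ===== Notes on version B (the rewrite author's own statement) =====
-- stated objective: simpler
-- what changed: Replaces A's incremental mutation (appending trainY[i] to a running trainX and popping the head of a running trainY0, snapshotting after each step) with independent per-window slicing: window k is trainX+trainY[:k] and trainY[k:], built by two comprehensions over range(max(1,PERIODS)).
import Mathlib
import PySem

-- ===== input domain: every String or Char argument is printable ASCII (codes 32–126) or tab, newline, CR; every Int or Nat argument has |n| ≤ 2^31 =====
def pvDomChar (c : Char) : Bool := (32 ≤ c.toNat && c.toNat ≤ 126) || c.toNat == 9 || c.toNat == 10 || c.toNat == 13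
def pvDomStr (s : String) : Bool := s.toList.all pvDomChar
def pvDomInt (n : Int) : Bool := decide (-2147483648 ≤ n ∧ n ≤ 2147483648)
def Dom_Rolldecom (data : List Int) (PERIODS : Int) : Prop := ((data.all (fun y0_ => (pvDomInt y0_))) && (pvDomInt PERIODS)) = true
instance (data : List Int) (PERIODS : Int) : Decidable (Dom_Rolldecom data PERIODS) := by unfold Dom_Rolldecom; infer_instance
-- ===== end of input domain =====

-- B replaces A's incremental append/pop mutation with independent per-window slicing (simpler decomposition, same cost).

-- ===== PORT A =====
def Rolldecom (data : List Int) (PERIODS : Int) : List (List Int) × List (List Int) :=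
  let trainX := PySem.List.slice data none (some (-PERIODS))   -- data[:-PERIODS]
  let trainY := PySem.List.slice data (some (-PERIODS)) none   -- data[-PERIODS:]
  -- loop state: (trainX, trainY0, trainX_all, trainY_all)
  let st := (PySem.List.pyRange 0 (PERIODS - 1) 1).foldl
    (fun (s : List Int × List Int × List (List Int) × List (List Int)) i =>
      let tX := s.1 ++ [PySem.List.pyGetD trainY i 0]   -- trainY[i]; in range on Pre_, raises outside
      let tY0 := s.2.1.drop 1                           -- trainY0.pop(0); nonempty whenever reached on Pre_
      (tX, tY0, s.2.2.1 ++ [tX], s.2.2.2 ++ [tY0]))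
    (trainX, trainY, [trainX], [trainY])
  (st.2.2.1, st.2.2.2)

-- ===== PORT B =====
def Rolldecom_alt (data : List Int) (PERIODS : Int) : List (List Int) × List (List Int) :=
  let trainX := PySem.List.slice data none (some (-PERIODS))   -- data[:-PERIODS]
  let trainY := PySem.List.slice data (some (-PERIODS)) none   -- data[-PERIODS:]
  let n := max 1 PERIODS
  ((PySem.List.pyRange 0 n 1).map (fun k => trainX ++ PySem.List.slice trainY none (some k)),
   (PySem.List.pyRange 0 n 1).map (fun k => PySem.List.slice trainY (some k) none))

-- ===== PRECONDITION & SPEC =====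
-- Pre_ excludes exactly the inputs where A raises IndexError: trainY[i] runs past the end of trainY
-- when PERIODS exceeds len(data)+1.
def Pre_Rolldecom (data : List Int) (PERIODS : Int) : Prop := PERIODS ≤ (data.length : Int) + 1
instance (data : List Int) (PERIODS : Int) : Decidable (Pre_Rolldecom data PERIODS) := by unfold Pre_Rolldecom; infer_instance
def pvWitness_Rolldecom : List Int × Int := ([1, 2, 3, 4, 5], 2)

def Spec_Rolldecom (data : List Int) (PERIODS : Int) (out : List (List Int) × List (List Int)) : Prop := out = Rolldecom_alt data PERIODS
instance (data : List Int) (PERIODS : Int) (out : List (List Int) × List (List Int)) : Decidable (Spec_Rolldecom data PERIODS out) := by unfold Spec_Rolldecom; infer_instance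

-- ===== CLAIM (what is proved, stated in full; the proofs are below) =====
def Claim_equal_Rolldecom : Prop := ∀ (data : List Int) (PERIODS : Int), Dom_Rolldecom data PERIODS → Pre_Rolldecom data PERIODS → Spec_Rolldecom data PERIODS (Rolldecom data PERIODS)

-- ===== LEMMAS AND PROOFS =====

-- A's loop, characterised: after m steps the state holds the first m elements of Y appended to X,
-- Y with its first m elements popped, and the snapshots of all intermediate values.
lemma rollLoop (X Y : List Int) (m : Nat) (hm : m ≤ Y.length) :
    (PySem.List.pyRange 0 (m : Int) 1).foldl
      (fun (s : List Int × List Int × List (List Int) × List (List Int)) i =>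
        (s.1 ++ [PySem.List.pyGetD Y i 0], (s.2.1).drop 1,
         s.2.2.1 ++ [s.1 ++ [PySem.List.pyGetD Y i 0]],
         s.2.2.2 ++ [(s.2.1).drop 1]))
      (X, Y, [X], [Y])
    = (X ++ Y.take m, Y.drop m,
       (List.range (m + 1)).map (fun k => X ++ Y.take k),
       (List.range (m + 1)).map (fun k => Y.drop k)) := by
  induction m with
  | zero => simp
  | succ m ih =>
    have hm' : m ≤ Y.length := Nat.le_of_succ_le hm
    have hlt : m < Y.length := hm
    have hget : PySem.List.pyGetD Y (m : Int) 0 = Y[m] := by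
      rw [PySem.List.pyGetD_natCast]; simp [hlt]
    have htake : List.take (m + 1) Y = List.take m Y ++ [Y[m]] := by
      rw [List.take_add_one]; simp [List.getElem?_eq_getElem hlt]
    have hdrop : (List.drop m Y).drop 1 = List.drop (m + 1) Y := by
      rw [List.drop_drop]
    have hstep : ((m : Nat) : Int) + 1 = ((m + 1 : Nat) : Int) := by push_cast; ring
    rw [← hstep, PySem.List.pyRange_one_succ_right (by positivity), List.foldl_append, ih hm']
    simp only [List.foldl_cons, List.foldl_nil, hget]
    rw [List.range_succ (n := m + 1)]
    refine Prod.ext ?_ (Prod.ext ?_ (Prod.ext ?_ ?_))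
    · rw [htake, ← List.append_assoc]
    · exact hdrop
    · rw [List.map_append, htake]
      simp [List.append_assoc]
    · rw [List.map_append]
      simp [hdrop]

-- B's comprehensions, characterised over List.range.
lemma mapTake (X Y : List Int) (n : Nat) :
    (PySem.List.pyRange 0 (n : Int) 1).map (fun k => X ++ PySem.List.slice Y none (some k))
      = (List.range n).map (fun k => X ++ Y.take k) := by
  rw [PySem.List.pyRange_one]
  simp only [Int.sub_zero, Int.toNat_natCast, List.map_map]
  refine List.map_congr_left fun k _ => ?_
  rw [Function.comp_apply, PySem.List.slice_to Y (b := 0 + (k : Int)) (by positivity)]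
  simp

lemma mapDrop (Y : List Int) (n : Nat) :
    (PySem.List.pyRange 0 (n : Int) 1).map (fun k => PySem.List.slice Y (some k) none)
      = (List.range n).map (fun k => Y.drop k) := by
  rw [PySem.List.pyRange_one]
  simp only [Int.sub_zero, Int.toNat_natCast, List.map_map]
  refine List.map_congr_left fun k _ => ?_
  rw [Function.comp_apply, PySem.List.slice_from Y (by positivity : (0 : Int) ≤ 0 + (k : Int))]
  simp

-- ===== VERDICT (by name: the statement is the Claim_ definition above) =====
theorem Rolldecom_spec : Claim_equal_Rolldecom := by
  intro data PERIODS _hdom hpre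
  unfold Spec_Rolldecom Rolldecom Rolldecom_alt
  dsimp only
  by_cases hP : PERIODS ≤ 1
  · -- degenerate case: no loop iteration, one window
    have h0 : PySem.List.pyRange 0 (PERIODS - 1) 1 = [] :=
      PySem.List.pyRange_one_eq_nil (by omega)
    have hn : max 1 PERIODS = ((1 : Nat) : Int) := by simp; omega
    rw [h0, hn, mapTake, mapDrop]
    simp [List.range_succ]
  · -- PERIODS ≥ 2: m = PERIODS - 1 loop iterations
    have hm1 : PERIODS - 1 = (((PERIODS - 1).toNat : Nat) : Int) := by omega
    set m : Nat := (PERIODS - 1).toNat with hmdef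
    have hYlen : m ≤ (PySem.List.slice data (some (-PERIODS)) none).length := by
      rw [PySem.List.slice_some_none]
      simp only [List.length_drop]
      unfold Pre_Rolldecom at hpre
      simp only [PySem.List.clampIdx]
      split_ifs <;> omega
    have hn : max 1 PERIODS = ((m + 1 : Nat) : Int) := by push_cast; omega
    rw [hm1, rollLoop _ _ m hYlen, hn, mapTake, mapDrop]
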